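-- pv_equiv track=rewrite | github.com/sanjanakotha/AD_variant_analysis | AD_variant_analysis/classify_domain_snvs.py | build_aa_to_nt_mapping
-- ===== SOURCE A (Python) =====
-- from typing import Dict, List, Optional, Tuple
--
-- def build_aa_to_nt_mapping(coords: List[Tuple[int, int]], strand: str) -> Tuple[Dict[int, List[int]], int]:
--     """
--     Build mapping from amino acid positions to nucleotide positions.
--
--     Args:
--         coords: List of (start, end) coordinate tuples
--         strand: Strand orientation
--
--     Returns:
--         Tuple of (aa_to_nt dictionary, aa_length)
--     """
--     # Collect all nucleotide positions
--     all_pos = []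
--     for start, end in coords:
--         if strand in ["+", "1", 1]:
--             all_pos += list(range(start, end + 1))
--         elif strand in ["-", "-1", -1]:
--             all_pos += list(range(start, end - 1, -1))
--
--     # Calculate amino acid length
--     nt_length = len(all_pos)
--     aa_length = int(nt_length / 3)
--
--     # Map each amino acid to its three nucleotides
--     dict_aa_coords = {}
--     start_codon = 0
--     for i in range(aa_length):
--         end_codon = start_codon + 3
--         dict_aa_coords[i + 1] = all_pos[start_codon:end_codon]
--         start_codon += 3
--
--     return dict_aa_coords, aa_length
-- ===== SOURCE B (Python) =====
-- def build_aa_to_nt_mapping(coords, strand):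
--     # One streaming pass: emit all nucleotide positions, then group them into
--     # codons by chunking an iterator into triples; number codons from 1.
--     if strand in ["+", "1", 1]:
--         pos = [p for start, end in coords for p in range(start, end + 1)]
--     elif strand in ["-", "-1", -1]:
--         pos = [p for start, end in coords for p in range(start, end - 1, -1)]
--     else:
--         pos = []
--     codons = list(zip(*[iter(pos)] * 3))
--     return {i: list(c) for i, c in enumerate(codons, start=1)}, len(codons)
-- ===== Notes on version B (the rewrite author's own statement) =====
-- stated objective: idiomatic
-- what changed: Replaces A's aa_length/start_codon index-and-slice bookkeeping with one streaming decomposition: hoist the strand test out of the coordinate loop, emit all positions once, chunk them into triples (zip over one iterator), and number the codons with enumerate.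
import Mathlib
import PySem

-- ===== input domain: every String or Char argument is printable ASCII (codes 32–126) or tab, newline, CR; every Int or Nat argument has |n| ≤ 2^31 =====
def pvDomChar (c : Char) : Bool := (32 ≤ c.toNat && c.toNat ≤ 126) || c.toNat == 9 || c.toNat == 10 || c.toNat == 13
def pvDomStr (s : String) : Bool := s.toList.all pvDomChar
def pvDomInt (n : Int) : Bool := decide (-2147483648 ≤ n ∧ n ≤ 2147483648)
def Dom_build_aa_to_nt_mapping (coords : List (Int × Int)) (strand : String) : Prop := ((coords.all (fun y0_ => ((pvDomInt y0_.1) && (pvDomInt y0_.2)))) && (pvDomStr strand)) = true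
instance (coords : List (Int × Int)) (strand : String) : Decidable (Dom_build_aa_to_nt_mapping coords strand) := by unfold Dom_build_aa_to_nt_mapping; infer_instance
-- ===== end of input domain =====

-- B replaces A's aa_length/start_codon slice bookkeeping with a single stream of
-- positions chunked into triples and numbered from 1 (objective: idiomatic).

-- ===== PORT A =====
def build_aa_to_nt_mapping (coords : List (Int × Int)) (strand : String) : (List (Int × List Int)) × Int :=
  let all_pos : List Int := coords.foldl (fun acc se =>
    if strand = "+" ∨ strand = "1" then acc ++ PySem.List.pyRange se.1 (se.2 + 1) 1
    else if strand = "-" ∨ strand = "-1" then acc ++ PySem.List.pyRange se.1 (se.2 - 1) (-1)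
    else acc) []
  let nt_length : Int := all_pos.length
  -- int(nt_length / 3): exact floor division here since nt_length ≥ 0 (and far below 2^53)
  let aa_length : Int := PySem.Int.floordiv nt_length 3
  let st := (PySem.List.pyRange 0 aa_length 1).foldl
    (fun (st : PySem.Dict Int (List Int) × Int) i =>
      let end_codon := st.2 + 3
      (st.1.insert (i + 1) (PySem.List.slice all_pos (some st.2) (some end_codon)), end_codon))
    (PySem.Dict.empty, 0)
  (st.1.items, aa_length)

-- ===== PORT B =====
-- zip(*[iter(pos)]*3): chunk into triples, dropping the leftover (< 3) tail
def pvChunk3 : List Int → List (Int × Int × Int)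
  | a :: b :: c :: rest => (a, b, c) :: pvChunk3 rest
  | _ => []

-- {i: list(c) for i, c in enumerate(codons, start=1)}
def pvNumberFrom (j : Int) : List (Int × Int × Int) → List (Int × List Int)
  | [] => []
  | t :: rest => (j, [t.1, t.2.1, t.2.2]) :: pvNumberFrom (j + 1) rest

def build_aa_to_nt_mapping_alt (coords : List (Int × Int)) (strand : String) : (List (Int × List Int)) × Int :=
  let pos : List Int :=
    if strand = "+" ∨ strand = "1" then coords.flatMap (fun se => PySem.List.pyRange se.1 (se.2 + 1) 1)
    else if strand = "-" ∨ strand = "-1" then coords.flatMap (fun se => PySem.List.pyRange se.1 (se.2 - 1) (-1))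
    else []
  let codons := pvChunk3 pos
  (pvNumberFrom 1 codons, codons.length)

-- ===== PRECONDITION & SPEC =====
def Spec_build_aa_to_nt_mapping (coords : List (Int × Int)) (strand : String) (out : (List (Int × List Int)) × Int) : Prop := out = build_aa_to_nt_mapping_alt coords strand
instance (coords : List (Int × Int)) (strand : String) (out : (List (Int × List Int)) × Int) : Decidable (Spec_build_aa_to_nt_mapping coords strand out) := by unfold Spec_build_aa_to_nt_mapping; infer_instance

-- ===== CLAIM (what is proved, stated in full; the proofs are below) =====
def Claim_equal_build_aa_to_nt_mapping : Prop := ∀ (coords : List (Int × Int)) (strand : String), Dom_build_aa_to_nt_mapping coords strand → Spec_build_aa_to_nt_mapping coords strand (build_aa_to_nt_mapping coords strand)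

-- ===== LEMMAS AND PROOFS =====

theorem pvChunk3_length (L : List Int) : (pvChunk3 L).length = L.length / 3 := by
  induction L using pvChunk3.induct with
  | case1 a b c rest ih => simp [pvChunk3, ih]; omega
  | case2 L h => cases L with
    | nil => simp [pvChunk3]
    | cons a t => cases t with
      | nil => simp [pvChunk3]
      | cons b u => cases u with
        | nil => simp [pvChunk3]
        | cons c v => exact absurd rfl (h a b c v)

-- B's chunk-and-number pass, characterised as a table over an index range
theorem pvGen (P : List Int) : ∀ (j : Int),
    pvNumberFrom (j + 1) (pvChunk3 P) =
      (PySem.List.pyRange j (j + ((P.length / 3 : ℕ) : Int)) 1).map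
        (fun i => (i + 1, List.take 3 (List.drop (3 * (i - j)).toNat P))) := by
  induction P using pvChunk3.induct with
  | case1 a b c rest ih =>
    intro j
    have hN : ((a :: b :: c :: rest).length) / 3 = rest.length / 3 + 1 := by simp; omega
    rw [hN]
    have hc : ((rest.length / 3 + 1 : ℕ) : Int) = ((rest.length / 3 : ℕ) : Int) + 1 := by
      push_cast; ring
    rw [hc, show j + (((rest.length / 3 : ℕ) : Int) + 1) = (j + 1) + ((rest.length / 3 : ℕ) : Int) from by ring]
    rw [PySem.List.pyRange_one_cons (by omega)]
    simp only [List.map_cons]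
    rw [show (3 * (j - j)).toNat = 0 from by omega]
    simp only [List.drop_zero, List.take_succ_cons, List.take_zero, pvChunk3, pvNumberFrom]
    refine congrArg₂ List.cons rfl ?_
    rw [ih (j + 1)]
    apply List.map_congr_left
    intro i hi
    have hji : j + 1 ≤ i := (PySem.List.mem_pyRange_one.mp hi).1
    have e : (3 * (i - j)).toNat = (3 * (i - (j + 1))).toNat + 1 + 1 + 1 := by omega
    rw [e]
    simp [List.drop_succ_cons]
  | case2 L h =>
    intro j
    have hN : L.length / 3 = 0 := by
      cases L with
      | nil => simp
      | cons a t => cases t with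
        | nil => simp
        | cons b u => cases u with
          | nil => simp
          | cons c v => exact absurd rfl (h a b c v)
    have hC : pvChunk3 L = [] := by
      cases L with
      | nil => rfl
      | cons a t => cases t with
        | nil => rfl
        | cons b u => cases u with
          | nil => rfl
          | cons c v => exact absurd rfl (h a b c v)
    rw [hN, hC, PySem.List.pyRange_one_eq_nil (by simp)]
    simp [pvNumberFrom]

-- A's codon loop with its (dict, start_codon) pair state, characterised:
theorem pvFoldA (L : List Int) (n : ℕ) : ∀ (j s : Int) (d : PySem.Dict Int (List Int)),
    ((PySem.List.pyRange j (j + n) 1).foldl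
      (fun (st : PySem.Dict Int (List Int) × Int) i =>
        let end_codon := st.2 + 3
        (st.1.insert (i + 1) (PySem.List.slice L (some st.2) (some end_codon)), end_codon))
      (d, s))
    = ((PySem.List.pyRange j (j + n) 1).foldl
        (fun d' i => d'.insert (i + 1)
          (PySem.List.slice L (some (s + 3 * (i - j))) (some (s + 3 * (i - j) + 3)))) d,
       s + 3 * n) := by
  induction n with
  | zero =>
    intro j s d
    rw [PySem.List.pyRange_one_eq_nil (by simp)]
    simp
  | succ m ih =>
    intro j s d
    have hc : ((m + 1 : ℕ) : Int) = (m : Int) + 1 := by push_cast; ring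
    rw [hc, show j + ((m : Int) + 1) = (j + 1) + (m : Int) from by ring]
    rw [PySem.List.pyRange_one_cons (by omega)]
    simp only [List.foldl_cons]
    rw [ih (j + 1) (s + 3)]
    rw [show s + 3 * (j - j) = s from by ring, show s + 3 = s + 3 * (j - j) + 3 from by ring]
    rw [Prod.mk.injEq]
    constructor
    · apply PySem.List.foldl_congr_mem
      intro acc x _
      rw [show s + 3 * (j - j) + 3 + 3 * (x - (j + 1)) = s + 3 * (x - j) from by ring]
    · ring

-- ===== VERDICT (by name: the statement is the Claim_ definition above) =====
theorem build_aa_to_nt_mapping_spec : Claim_equal_build_aa_to_nt_mapping := by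
  intro coords strand _
  unfold Spec_build_aa_to_nt_mapping build_aa_to_nt_mapping build_aa_to_nt_mapping_alt
  simp only []
  have hpos : coords.foldl (fun acc se =>
      if strand = "+" ∨ strand = "1" then acc ++ PySem.List.pyRange se.1 (se.2 + 1) 1
      else if strand = "-" ∨ strand = "-1" then acc ++ PySem.List.pyRange se.1 (se.2 - 1) (-1)
      else acc) [] =
      (if strand = "+" ∨ strand = "1" then coords.flatMap (fun se => PySem.List.pyRange se.1 (se.2 + 1) 1)
       else if strand = "-" ∨ strand = "-1" then coords.flatMap (fun se => PySem.List.pyRange se.1 (se.2 - 1) (-1))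
       else []) := by
    by_cases h1 : strand = "+" ∨ strand = "1"
    · simp only [h1, if_true]
      exact PySem.List.foldl_append_eq_flatMap _ _ _
    · by_cases h2 : strand = "-" ∨ strand = "-1"
      · simp only [h1, h2, if_false, if_true]
        exact PySem.List.foldl_append_eq_flatMap _ _ _
      · simp only [h1, h2, if_false]
        exact List.foldl_fixed _
  rw [hpos]
  set L : List Int := (if strand = "+" ∨ strand = "1" then coords.flatMap (fun se => PySem.List.pyRange se.1 (se.2 + 1) 1)
       else if strand = "-" ∨ strand = "-1" then coords.flatMap (fun se => PySem.List.pyRange se.1 (se.2 - 1) (-1))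
       else []) with hL
  have hfd : PySem.Int.floordiv (↑L.length) 3 = ((L.length / 3 : ℕ) : Int) := by
    simp [PySem.Int.floordiv, Int.fdiv_eq_ediv]
  rw [hfd]
  have hfold := pvFoldA L (L.length / 3) 0 0 PySem.Dict.empty
  rw [show ((0 : Int) + ((L.length / 3 : ℕ) : Int)) = ((L.length / 3 : ℕ) : Int) from by ring] at hfold
  rw [hfold]
  have hitems := PySem.Dict.items_foldl_insert_fresh
    (PySem.List.pyRange 0 ((L.length / 3 : ℕ) : Int) 1)
    (fun i => i + 1)
    (fun i => PySem.List.slice L (some (0 + 3 * (i - 0))) (some (0 + 3 * (i - 0) + 3)))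
    PySem.Dict.empty
    (by intro a _; simp)
    (by
      apply List.Nodup.map
      · intro a b hab; simpa using hab
      · exact PySem.List.nodup_pyRange_one _ _)
  rw [hitems]
  rw [Prod.mk.injEq]
  constructor
  · have hg := pvGen L 0
    rw [show (0 : Int) + 1 = 1 from by ring, show (0 : Int) + ((L.length / 3 : ℕ) : Int) = ((L.length / 3 : ℕ) : Int) from by ring] at hg
    rw [hg]
    have he : (PySem.Dict.empty : PySem.Dict Int (List Int)).items = [] := rfl
    rw [he, List.nil_append]
    apply List.map_congr_left
    intro i hi
    have h0 : (0 : Int) ≤ i := (PySem.List.mem_pyRange_one.mp hi).1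
    show (i + 1, PySem.List.slice L (some (0 + 3 * (i - 0))) (some (0 + 3 * (i - 0) + 3))) =
      (i + 1, List.take 3 (List.drop (3 * (i - 0)).toNat L))
    rw [show (0 : Int) + 3 * (i - 0) = 3 * i from by ring]
    rw [PySem.List.slice_toNat L (by omega) (by omega)]
    rw [show (3 * i + 3).toNat - (3 * i).toNat = 3 from by omega]
    rw [show 3 * (i - 0) = 3 * i from by ring]
  · rw [pvChunk3_length]
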